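-- pv_equiv track=rewrite | github.com/ARL150/IDE-COMPILADORES | compiler/lexer.py | match_compound_operator
-- ===== SOURCE A (Python) =====
-- COMPOUND_OPERATORS = {
--     "++": "INCREMENT",
--     "--": "DECREMENT",
--     "<=": "LE",
--     ">=": "GE",
--     "==": "EQ",
--     "!=": "NE",
--     "&&": "AND",
--     "||": "OR"
-- }
--
-- def match_compound_operator(code, position):
--     """
--     Intenta reconocer operadores compuestos aunque estén separados
--     por espacios o saltos de línea.
--     """
--     if position >= len(code):
--         return None
--
--     first = code[position]
--     candidates = [op for op in COMPOUND_OPERATORS if op[0] == first]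
--
--     for op in candidates:
--         second = op[1]
--         i = position + 1
--
--         while i < len(code) and code[i].isspace():
--             i += 1
--
--         if i < len(code) and code[i] == second:
--             consumed = code[position:i + 1]
--             return COMPOUND_OPERATORS[op], consumed, op
--
--     return None
-- ===== SOURCE B (Python) =====
-- COMPOUND_OPERATORS = {
--     "++": "INCREMENT",
--     "--": "DECREMENT",
--     "<=": "LE",
--     ">=": "GE",
--     "==": "EQ",
--     "!=": "NE",
--     "&&": "AND",
--     "||": "OR"
-- }
--
-- def match_compound_operator(code, position):
--     """Skip whitespace once after position and look the two-character
--     operator up directly (each first character keys a unique operator)."""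
--     if position >= len(code):
--         return None
--     i = position + 1
--     while i < len(code) and code[i].isspace():
--         i += 1
--     if i >= len(code):
--         return None
--     op = code[position] + code[i]
--     token = COMPOUND_OPERATORS.get(op)
--     if token is None:
--         return None
--     return token, code[position:i + 1], op
-- ===== Notes on version B (the rewrite author's own statement) =====
-- stated objective: simpler
-- what changed: B drops A's candidate list-comprehension over the operator table and the per-candidate loop (each re-running the whitespace scan): it skips whitespace once to the next non-space index and looks the two-character operator up directly in the dict.
import Mathlib
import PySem

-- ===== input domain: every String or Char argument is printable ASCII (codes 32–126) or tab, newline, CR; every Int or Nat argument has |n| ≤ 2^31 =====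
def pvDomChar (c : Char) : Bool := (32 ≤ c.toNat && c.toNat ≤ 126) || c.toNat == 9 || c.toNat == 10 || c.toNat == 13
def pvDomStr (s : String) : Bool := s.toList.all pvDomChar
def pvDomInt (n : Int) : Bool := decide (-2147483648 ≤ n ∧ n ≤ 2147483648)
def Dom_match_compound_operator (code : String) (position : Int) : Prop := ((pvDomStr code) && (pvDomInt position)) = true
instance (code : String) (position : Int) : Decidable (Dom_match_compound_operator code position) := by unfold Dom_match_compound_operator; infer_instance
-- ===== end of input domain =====

-- B replaces A's candidate-filtering loop over the operator table by a single whitespace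
-- skip followed by one direct dictionary lookup of the two-character operator (objective: simpler).

-- module-level constant shared by both Pythons
def COMPOUND_OPERATORS : PySem.Dict String String :=
  PySem.Dict.ofList [("++", "INCREMENT"), ("--", "DECREMENT"), ("<=", "LE"), (">=", "GE"),
                     ("==", "EQ"), ("!=", "NE"), ("&&", "AND"), ("||", "OR")]

-- the `while i < len(code) and code[i].isspace(): i += 1` loop (identical in Source A and Source B)
def pvSkipSpaces (cs : List Char) (i : Int) : Int :=
  if _h : i < (cs.length : Int) then
    match PySem.List.pyGet? cs i with
    | some c => if PySem.Chars.isspace c then pvSkipSpaces cs (i + 1) else i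
    | none => i   -- Python raises IndexError here (i < -len); excluded by Pre_
  else i
termination_by ((cs.length : Int) - i).toNat
decreasing_by simp; omega

-- ===== PORT A =====
-- the `for op in candidates:` loop of A
def pvTryCandidates (cs : List Char) (position : Int) (cands : List String) :
    Option (String × String × String) :=
  match cands with
  | [] => none
  | op :: rest =>
    match PySem.Str.pyGet? op 1 with   -- second = op[1]; every key has length 2, never none
    | some second =>
      let i := pvSkipSpaces cs (position + 1)
      if i < (cs.length : Int) && (PySem.List.pyGet? cs i == some second) then
        some (COMPOUND_OPERATORS.getD op "",   -- key is drawn from the dict, always present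
              String.ofList (PySem.List.slice cs (some position) (some (i + 1))), op)
      else pvTryCandidates cs position rest
    | none => pvTryCandidates cs position rest

def match_compound_operator (code : String) (position : Int) : Option (String × String × String) :=
  let cs := code.toList
  if (cs.length : Int) ≤ position then none
  else
    match PySem.List.pyGet? cs position with   -- first = code[position]
    | none => none   -- IndexError (position < -len); excluded by Pre_
    | some first =>
      let candidates := COMPOUND_OPERATORS.keys.filter
        (fun op => PySem.Str.pyGet? op 0 == some first)
      pvTryCandidates cs position candidates

-- ===== PORT B =====
def match_compound_operator_alt (code : String) (position : Int) : Option (String × String × String) :=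
  let cs := code.toList
  if (cs.length : Int) ≤ position then none
  else
    let i := pvSkipSpaces cs (position + 1)
    if (cs.length : Int) ≤ i then none
    else
      match PySem.List.pyGet? cs position, PySem.List.pyGet? cs i with
      | some first, some c2 =>
        let op := String.ofList [first, c2]   -- op = code[position] + code[i]
        match COMPOUND_OPERATORS.get? op with
        | some token =>
          some (token, String.ofList (PySem.List.slice cs (some position) (some (i + 1))), op)
        | none => none
      | _, _ => none   -- IndexError (index < -len); excluded by Pre_

-- ===== PRECONDITION & SPEC =====
-- Pre_ excludes exactly the inputs where the Python raises IndexError: a position below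
-- -len(code) reaches code[position] (or the whitespace scan) with an out-of-range index.
def Pre_match_compound_operator (code : String) (position : Int) : Prop :=
  -(code.toList.length : Int) ≤ position
instance (code : String) (position : Int) : Decidable (Pre_match_compound_operator code position) := by
  unfold Pre_match_compound_operator; infer_instance

def pvWitness_match_compound_operator : String × Int := ("+ +", 0)

def Spec_match_compound_operator (code : String) (position : Int) (out : Option (String × String × String)) : Prop := out = match_compound_operator_alt code position
instance (code : String) (position : Int) (out : Option (String × String × String)) : Decidable (Spec_match_compound_operator code position out) := by unfold Spec_match_compound_operator; infer_instance

-- ===== CLAIM (what is proved, stated in full; the proofs are below) =====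
def Claim_equal_match_compound_operator : Prop := ∀ (code : String) (position : Int), Dom_match_compound_operator code position → Pre_match_compound_operator code position → Spec_match_compound_operator code position (match_compound_operator code position)

-- ===== LEMMAS AND PROOFS =====

lemma pvPyGet?_total (xs : List Char) (i : Int) (h1 : -(xs.length : Int) ≤ i)
    (h2 : i < (xs.length : Int)) : ∃ c, PySem.List.pyGet? xs i = some c := by
  simp only [PySem.List.pyGet?, PySem.List.pyIdx?]
  split_ifs with h0
  · simp [List.getElem?_eq_getElem (show i.toNat < xs.length by omega)]
  · simp [List.getElem?_eq_getElem (show xs.length - (-i).toNat < xs.length by omega)]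

lemma pvSkipSpaces_ge (cs : List Char) (i : Int) : i ≤ pvSkipSpaces cs i := by
  fun_induction pvSkipSpaces cs i <;> omega

lemma pvTryCandidates_none_of_out (cs : List Char) (position : Int) (cands : List String)
    (h : (cs.length : Int) ≤ pvSkipSpaces cs (position + 1)) :
    pvTryCandidates cs position cands = none := by
  induction cands with
  | nil => rfl
  | cons op rest ih =>
    rw [pvTryCandidates]
    cases hop : PySem.Str.pyGet? op 1 with
    | none => simpa using ih
    | some second =>
      have hlt : ¬ pvSkipSpaces cs (position + 1) < (cs.length : Int) := by omega
      simp [hlt, ih]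

lemma pvKeys : COMPOUND_OPERATORS.keys = ["++", "--", "<=", ">=", "==", "!=", "&&", "||"] := by
  decide

lemma pvBeqStr2 (a b x y : Char) :
    (String.ofList [x, y] == String.ofList [a, b]) = (x == a && y == b) := by
  by_cases hy : y = b
  · subst hy
    by_cases hx : x = a
    · subst hx; simp
    · have e1 : (String.ofList [x, y] == String.ofList [a, y]) = false := by
        simp [String.ext_iff, hx]
      have e2 : (x == a) = false := by simp [hx]
      simp [e1, e2]
  · have e1 : (String.ofList [x, y] == String.ofList [a, b]) = false := by
      simp [String.ext_iff, hy]
    have e2 : (y == b) = false := by simp [hy]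
    simp [e1, e2]

lemma pvCandidates (c : Char) :
  COMPOUND_OPERATORS.keys.filter (fun op => PySem.Str.pyGet? op 0 == some c) =
  (if c = '+' then [String.ofList ['+','+']] else if c = '-' then [String.ofList ['-','-']] else if c = '<' then [String.ofList ['<','=']] else if c = '>' then [String.ofList ['>','=']] else if c = '=' then [String.ofList ['=','=']] else if c = '!' then [String.ofList ['!','=']] else if c = '&' then [String.ofList ['&','&']] else if c = '|' then [String.ofList ['|','|']] else []) := by
  rw [pvKeys]; simp only [List.filter]
  by_cases h1 : c = '+'
  · subst h1; decide
  rw [show (PySem.Str.pyGet? "++" 0 == some c) = false from by simp [Ne.symm h1], if_neg h1]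
  by_cases h2 : c = '-'
  · subst h2; decide
  rw [show (PySem.Str.pyGet? "--" 0 == some c) = false from by simp [Ne.symm h2], if_neg h2]
  by_cases h3 : c = '<'
  · subst h3; decide
  rw [show (PySem.Str.pyGet? "<=" 0 == some c) = false from by simp [Ne.symm h3], if_neg h3]
  by_cases h4 : c = '>'
  · subst h4; decide
  rw [show (PySem.Str.pyGet? ">=" 0 == some c) = false from by simp [Ne.symm h4], if_neg h4]
  by_cases h5 : c = '='
  · subst h5; decide
  rw [show (PySem.Str.pyGet? "==" 0 == some c) = false from by simp [Ne.symm h5], if_neg h5]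
  by_cases h6 : c = '!'
  · subst h6; decide
  rw [show (PySem.Str.pyGet? "!=" 0 == some c) = false from by simp [Ne.symm h6], if_neg h6]
  by_cases h7 : c = '&'
  · subst h7; decide
  rw [show (PySem.Str.pyGet? "&&" 0 == some c) = false from by simp [Ne.symm h7], if_neg h7]
  by_cases h8 : c = '|'
  · subst h8; decide
  rw [show (PySem.Str.pyGet? "||" 0 == some c) = false from by simp [Ne.symm h8], if_neg h8]

lemma pvGetTwo (a b : Char) :
  COMPOUND_OPERATORS.get? (String.ofList [a, b]) =
  (if a = '+' ∧ b = '+' then some "INCREMENT" else if a = '-' ∧ b = '-' then some "DECREMENT" else if a = '<' ∧ b = '=' then some "LE" else if a = '>' ∧ b = '=' then some "GE" else if a = '=' ∧ b = '=' then some "EQ" else if a = '!' ∧ b = '=' then some "NE" else if a = '&' ∧ b = '&' then some "AND" else if a = '|' ∧ b = '|' then some "OR" else none) := by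
  have hd : COMPOUND_OPERATORS = PySem.Dict.mk [(String.ofList ['+','+'], "INCREMENT"), (String.ofList ['-','-'], "DECREMENT"), (String.ofList ['<','='], "LE"), (String.ofList ['>','='], "GE"), (String.ofList ['=','='], "EQ"), (String.ofList ['!','='], "NE"), (String.ofList ['&','&'], "AND"), (String.ofList ['|','|'], "OR")] := by decide
  rw [hd]
  simp only [PySem.Dict.get?_mk_cons, pvBeqStr2]
  by_cases ha1 : a = '+'
  · subst ha1
    by_cases hb : b = '+'
    · subst hb; decide
    · have e : ('+' == b) = false := by simp [Ne.symm hb]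
      simp [e, hb, PySem.Dict.get?]
  by_cases ha2 : a = '-'
  · subst ha2
    by_cases hb : b = '-'
    · subst hb; decide
    · have e : ('-' == b) = false := by simp [Ne.symm hb]
      simp [e, hb, PySem.Dict.get?]
  by_cases ha3 : a = '<'
  · subst ha3
    by_cases hb : b = '='
    · subst hb; decide
    · have e : ('=' == b) = false := by simp [Ne.symm hb]
      simp [e, hb, PySem.Dict.get?]
  by_cases ha4 : a = '>'
  · subst ha4
    by_cases hb : b = '='
    · subst hb; decide
    · have e : ('=' == b) = false := by simp [Ne.symm hb]
      simp [e, hb, PySem.Dict.get?]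
  by_cases ha5 : a = '='
  · subst ha5
    by_cases hb : b = '='
    · subst hb; decide
    · have e : ('=' == b) = false := by simp [Ne.symm hb]
      simp [e, hb, PySem.Dict.get?]
  by_cases ha6 : a = '!'
  · subst ha6
    by_cases hb : b = '='
    · subst hb; decide
    · have e : ('=' == b) = false := by simp [Ne.symm hb]
      simp [e, hb, PySem.Dict.get?]
  by_cases ha7 : a = '&'
  · subst ha7
    by_cases hb : b = '&'
    · subst hb; decide
    · have e : ('&' == b) = false := by simp [Ne.symm hb]
      simp [e, hb, PySem.Dict.get?]
  by_cases ha8 : a = '|'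
  · subst ha8
    by_cases hb : b = '|'
    · subst hb; decide
    · have e : ('|' == b) = false := by simp [Ne.symm hb]
      simp [e, hb, PySem.Dict.get?]
  have e1 : ('+' == a) = false := by simp [Ne.symm ha1]
  have e2 : ('-' == a) = false := by simp [Ne.symm ha2]
  have e3 : ('<' == a) = false := by simp [Ne.symm ha3]
  have e4 : ('>' == a) = false := by simp [Ne.symm ha4]
  have e5 : ('=' == a) = false := by simp [Ne.symm ha5]
  have e6 : ('!' == a) = false := by simp [Ne.symm ha6]
  have e7 : ('&' == a) = false := by simp [Ne.symm ha7]
  have e8 : ('|' == a) = false := by simp [Ne.symm ha8]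
  simp [e1, e2, e3, e4, e5, e6, e7, e8, ha1, ha2, ha3, ha4, ha5, ha6, ha7, ha8, PySem.Dict.get?]

-- ===== VERDICT (by name: the statement is the Claim_ definition above) =====
theorem match_compound_operator_spec : Claim_equal_match_compound_operator := by
  intro code position hdom hpre
  unfold Pre_match_compound_operator at hpre
  unfold Spec_match_compound_operator match_compound_operator match_compound_operator_alt
  by_cases hlen : (code.toList.length : Int) ≤ position
  · rw [if_pos hlen, if_pos hlen]
  · simp only [if_neg hlen]
    obtain ⟨c, hc⟩ := pvPyGet?_total code.toList position hpre (by omega)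
    by_cases hout : (code.toList.length : Int) ≤ pvSkipSpaces code.toList (position + 1)
    · rw [hc]
      dsimp only
      rw [pvTryCandidates_none_of_out _ _ _ hout, if_pos hout]
    · have hige := pvSkipSpaces_ge code.toList (position + 1)
      have hlt : pvSkipSpaces code.toList (position + 1) < (code.toList.length : Int) := by omega
      obtain ⟨c2, hg2⟩ := pvPyGet?_total code.toList (pvSkipSpaces code.toList (position + 1))
        (by omega) hlt
      rw [hc, if_neg hout, hg2]
      dsimp only
      rw [pvCandidates, pvGetTwo]
      by_cases hcA1 : c = '+'
      · subst hcA1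
        by_cases hb : c2 = '+'
        · subst hb
          simp [pvTryCandidates, hg2, PySem.Dict.getD_eq_get?_getD]
          exact ⟨hlt, by decide⟩
        · have e : (c2 == '+') = false := by simp [hb]
          simp [pvTryCandidates, hg2, e, hb]
      rw [if_neg hcA1]
      by_cases hcA2 : c = '-'
      · subst hcA2
        by_cases hb : c2 = '-'
        · subst hb
          simp [pvTryCandidates, hg2, PySem.Dict.getD_eq_get?_getD]
          exact ⟨hlt, by decide⟩
        · have e : (c2 == '-') = false := by simp [hb]
          simp [pvTryCandidates, hg2, e, hb]
      rw [if_neg hcA2]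
      by_cases hcA3 : c = '<'
      · subst hcA3
        by_cases hb : c2 = '='
        · subst hb
          simp [pvTryCandidates, hg2, PySem.Dict.getD_eq_get?_getD]
          exact ⟨hlt, by decide⟩
        · have e : (c2 == '=') = false := by simp [hb]
          simp [pvTryCandidates, hg2, e, hb]
      rw [if_neg hcA3]
      by_cases hcA4 : c = '>'
      · subst hcA4
        by_cases hb : c2 = '='
        · subst hb
          simp [pvTryCandidates, hg2, PySem.Dict.getD_eq_get?_getD]
          exact ⟨hlt, by decide⟩
        · have e : (c2 == '=') = false := by simp [hb]
          simp [pvTryCandidates, hg2, e, hb]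
      rw [if_neg hcA4]
      by_cases hcA5 : c = '='
      · subst hcA5
        by_cases hb : c2 = '='
        · subst hb
          simp [pvTryCandidates, hg2, PySem.Dict.getD_eq_get?_getD]
          exact ⟨hlt, by decide⟩
        · have e : (c2 == '=') = false := by simp [hb]
          simp [pvTryCandidates, hg2, e, hb]
      rw [if_neg hcA5]
      by_cases hcA6 : c = '!'
      · subst hcA6
        by_cases hb : c2 = '='
        · subst hb
          simp [pvTryCandidates, hg2, PySem.Dict.getD_eq_get?_getD]
          exact ⟨hlt, by decide⟩
        · have e : (c2 == '=') = false := by simp [hb]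
          simp [pvTryCandidates, hg2, e, hb]
      rw [if_neg hcA6]
      by_cases hcA7 : c = '&'
      · subst hcA7
        by_cases hb : c2 = '&'
        · subst hb
          simp [pvTryCandidates, hg2, PySem.Dict.getD_eq_get?_getD]
          exact ⟨hlt, by decide⟩
        · have e : (c2 == '&') = false := by simp [hb]
          simp [pvTryCandidates, hg2, e, hb]
      rw [if_neg hcA7]
      by_cases hcA8 : c = '|'
      · subst hcA8
        by_cases hb : c2 = '|'
        · subst hb
          simp [pvTryCandidates, hg2, PySem.Dict.getD_eq_get?_getD]
          exact ⟨hlt, by decide⟩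
        · have e : (c2 == '|') = false := by simp [hb]
          simp [pvTryCandidates, hg2, e, hb]
      rw [if_neg hcA8]
      simp [pvTryCandidates, hcA1, hcA2, hcA3, hcA4, hcA5, hcA6, hcA7, hcA8]
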